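-- pv_equiv track=rewrite | github.com/adamswbrown/azure-architecture-categoriser- | src/catalog_builder/detector.py | _product_matches_filter
-- ===== SOURCE A (Python) =====
-- def _product_matches_filter(
--
--     doc_products: list[str],
--     allowed_products: list[str]
-- ) -> bool:
--     """Check if any document product matches allowed products.
--
--     Supports both exact matching and prefix matching:
--     - Exact: "azure-app-service" matches "azure-app-service"
--     - Prefix: "azure" matches "azure-app-service", "azure-kubernetes-service", etc.
--     """
--     for doc_product in doc_products:
--         for allowed in allowed_products:
--             # Exact match
--             if doc_product == allowed:
--                 return True
--             # Prefix match: allowed is a prefix of doc_product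
--             # e.g., "azure" matches "azure-kubernetes-service"
--             if doc_product.startswith(allowed + '-'):
--                 return True
--             # Also match if allowed is the doc_product prefix
--             # e.g., "azure-kubernetes" matches "azure-kubernetes-service"
--             if doc_product.startswith(allowed):
--                 return True
--     return False
-- ===== SOURCE B (Python) =====
-- def _product_matches_filter(
--     doc_products: list[str],
--     allowed_products: list[str]
-- ) -> bool:
--     """Build the set of all prefixes of the doc products once, then test each
--     allowed product by a single set-membership lookup."""
--     prefixes = set()
--     for d in doc_products:
--         for i in range(len(d) + 1):
--             prefixes.add(d[:i])
--     return any(a in prefixes for a in allowed_products)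
-- ===== Notes on version B (the rewrite author's own statement) =====
-- stated objective: alternative
-- what changed: Replaces the nested doc x allowed scan with three redundant startswith tests by one pass that builds a set of every prefix of every doc product, after which each allowed product is a single set-membership lookup; it trades early exit for index building, so it is not measurably faster.
import Mathlib
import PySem

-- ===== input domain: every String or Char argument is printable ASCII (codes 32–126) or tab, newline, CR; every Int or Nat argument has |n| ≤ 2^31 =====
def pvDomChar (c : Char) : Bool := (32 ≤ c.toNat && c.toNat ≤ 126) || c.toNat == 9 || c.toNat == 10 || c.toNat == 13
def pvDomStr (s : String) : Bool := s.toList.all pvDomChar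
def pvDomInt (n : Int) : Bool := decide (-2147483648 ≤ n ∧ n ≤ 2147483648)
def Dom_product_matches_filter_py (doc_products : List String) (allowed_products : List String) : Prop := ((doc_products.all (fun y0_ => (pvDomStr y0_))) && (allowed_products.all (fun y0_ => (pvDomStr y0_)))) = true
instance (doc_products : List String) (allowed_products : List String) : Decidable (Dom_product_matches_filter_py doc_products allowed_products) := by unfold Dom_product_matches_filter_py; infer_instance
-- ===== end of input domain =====

-- B builds the set of all prefixes of the doc products in one pass, then tests each allowed
-- product by set membership (objective: alternative). A's three tests collapse to a prefix test.

-- ===== PORT A =====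
-- inner 'for allowed in allowed_products' loop with early return
def pmfInner (doc_product : String) : List String → Bool
  | [] => false
  | allowed :: rest =>
    if doc_product == allowed then true
    else if PySem.Str.startswith doc_product (allowed ++ "-") then true
    else if PySem.Str.startswith doc_product allowed then true
    else pmfInner doc_product rest

def product_matches_filter_py (doc_products : List String) (allowed_products : List String) : Bool :=
  match doc_products with
  | [] => false
  | d :: ds =>
    if pmfInner d allowed_products then true
    else product_matches_filter_py ds allowed_products

-- ===== PORT B =====
-- prefixes = set(); for d in docs: for i in range(len(d)+1): prefixes.add(d[:i])
def pmfPrefixes (doc_products : List String) : PySem.Set String :=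
  doc_products.foldl
    (fun s d =>
      (PySem.List.pyRange 0 (PySem.Str.len d + 1) 1).foldl
        (fun s i => PySem.Set.add s (PySem.Str.slice d none (some i))) s)
    PySem.Set.empty

def product_matches_filter_py_alt (doc_products : List String) (allowed_products : List String) : Bool :=
  allowed_products.any (fun a => PySem.Set.contains (pmfPrefixes doc_products) a)

-- ===== PRECONDITION & SPEC =====
def Spec_product_matches_filter_py (doc_products : List String) (allowed_products : List String) (out : Bool) : Prop := out = product_matches_filter_py_alt doc_products allowed_products
instance (doc_products : List String) (allowed_products : List String) (out : Bool) : Decidable (Spec_product_matches_filter_py doc_products allowed_products out) := by unfold Spec_product_matches_filter_py; infer_instance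

-- ===== CLAIM (what is proved, stated in full; the proofs are below) =====
def Claim_equal_product_matches_filter_py : Prop := ∀ (doc_products : List String) (allowed_products : List String), Dom_product_matches_filter_py doc_products allowed_products → Spec_product_matches_filter_py doc_products allowed_products (product_matches_filter_py doc_products allowed_products)

-- ===== LEMMAS AND PROOFS =====

-- A's three branch tests collapse to "allowed is a prefix of doc_product"
lemma pmfInner_eq (d : String) (aps : List String) :
    pmfInner d aps = aps.any (fun a => decide (a.toList <+: d.toList)) := by
  induction aps with
  | nil => rfl
  | cons a rest ih =>
    simp only [pmfInner, List.any_cons, ← ih]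
    by_cases h3 : a.toList <+: d.toList
    · have h3' : PySem.Str.startswith d a = true := by
        simp [PySem.Str.startswith_eq, PySem.Chars.startswith_iff, h3]
    -- whichever of the three tests fires first, the result is true
      split_ifs <;> simp_all
    · have h1 : (d == a) = false := by
        rcases Bool.eq_false_or_eq_true (d == a) with h | h
        · exact absurd (by simp [String.ext_iff.mp (eq_of_beq h)] : a.toList <+: d.toList) h3
        · exact h
      have h2 : PySem.Chars.startswith d.toList (a.toList ++ ['-']) = false :=
        Bool.eq_false_iff.mpr (fun hc =>
          h3 ((List.prefix_append a.toList ['-']).trans ((PySem.Chars.startswith_iff _ _).mp hc)))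
      have h3' : PySem.Chars.startswith d.toList a.toList = false :=
        Bool.eq_false_iff.mpr (fun hc => h3 ((PySem.Chars.startswith_iff _ _).mp hc))
      simp [h1, h2, h3', h3]

-- the slices d[:i], i = 0..len(d), are exactly the prefixes of d
lemma slice_mem_range_iff (d a : String) :
    (∃ i ∈ PySem.List.pyRange 0 (PySem.Str.len d + 1) 1,
        a = PySem.Str.slice d none (some i)) ↔ a.toList <+: d.toList := by
  constructor
  · rintro ⟨i, hi, rfl⟩
    rw [PySem.List.mem_pyRange_one] at hi
    have h : (PySem.Str.slice d none (some i)).toList = d.toList.take i.toNat := by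
      rw [PySem.Str.toList_slice, PySem.Chars.slice_eq_listSlice, PySem.List.slice_to _ hi.1]
    rw [h]
    exact List.take_prefix _ _
  · intro h
    refine ⟨(a.toList.length : Int), ?_, ?_⟩
    · rw [PySem.List.mem_pyRange_one]
      have := h.length_le
      rw [PySem.Str.len_eq]
      constructor <;> [positivity; omega]
    · apply String.ext
      rw [PySem.Str.toList_slice, PySem.Chars.slice_eq_listSlice,
        PySem.List.slice_to _ (by positivity : (0:Int) ≤ (a.toList.length : Int))]
      rw [List.prefix_iff_eq_take.mp h]
      simp
      omega

-- membership in the prefix set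
lemma mem_pmfPrefixes (doc_products : List String) (a : String) :
    a ∈ pmfPrefixes doc_products ↔ ∃ d ∈ doc_products, a.toList <+: d.toList := by
  unfold pmfPrefixes
  have key : ∀ (s : PySem.Set String),
      a ∈ doc_products.foldl
        (fun s d => (PySem.List.pyRange 0 (PySem.Str.len d + 1) 1).foldl
          (fun s i => PySem.Set.add s (PySem.Str.slice d none (some i))) s) s
      ↔ a ∈ s ∨ ∃ d ∈ doc_products, a.toList <+: d.toList := by
    induction doc_products with
    | nil => simp
    | cons d ds ih =>
      intro s
      simp only [List.foldl_cons, ih, PySem.Set.mem_foldl_add, List.mem_cons]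
      rw [slice_mem_range_iff d a]
      constructor
      · rintro (⟨h | h⟩ | ⟨x, hx, hp⟩)
        · exact Or.inl h
        · exact Or.inr ⟨d, Or.inl rfl, h⟩
        · exact Or.inr ⟨x, Or.inr hx, hp⟩
      · rintro (h | ⟨x, hx | hx, hp⟩)
        · exact Or.inl (Or.inl h)
        · exact Or.inl (Or.inr (hx ▸ hp))
        · exact Or.inr ⟨x, hx, hp⟩
  simpa using key PySem.Set.empty

-- characterisation of A's nested loop
lemma pmfA_eq_true_iff (doc_products allowed_products : List String) :
    product_matches_filter_py doc_products allowed_products = true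
      ↔ ∃ d ∈ doc_products, ∃ a ∈ allowed_products, a.toList <+: d.toList := by
  induction doc_products with
  | nil => simp [product_matches_filter_py]
  | cons d ds ih =>
    simp only [product_matches_filter_py]
    cases hpm : pmfInner d allowed_products
    case true =>
      have hd : ∃ a ∈ allowed_products, a.toList <+: d.toList := by
        simpa [pmfInner_eq, List.any_eq_true] using hpm
      simp only [if_true, true_iff, List.mem_cons]
      obtain ⟨x, hx, hp⟩ := hd
      exact ⟨d, Or.inl rfl, x, hx, hp⟩
    case false =>
      have hno : ¬ ∃ a ∈ allowed_products, a.toList <+: d.toList := by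
        simpa [pmfInner_eq, List.any_eq_true] using hpm
      simp only [Bool.false_eq_true, if_false, ih, List.mem_cons]
      constructor
      · rintro ⟨x, hx, hp⟩; exact ⟨x, Or.inr hx, hp⟩
      · rintro ⟨x, hx | hx, hp⟩
        · exact absurd (hx ▸ hp) hno
        · exact ⟨x, hx, hp⟩

-- ===== VERDICT (by name: the statement is the Claim_ definition above) =====
theorem product_matches_filter_py_spec : Claim_equal_product_matches_filter_py := by
  intro doc_products allowed_products _
  unfold Spec_product_matches_filter_py product_matches_filter_py_alt
  have hB : (allowed_products.any (fun a => PySem.Set.contains (pmfPrefixes doc_products) a)) = true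
      ↔ ∃ a ∈ allowed_products, ∃ d ∈ doc_products, a.toList <+: d.toList := by
    simp only [List.any_eq_true, PySem.Set.contains_iff, mem_pmfPrefixes]
  rcases Bool.eq_false_or_eq_true (product_matches_filter_py doc_products allowed_products) with h | h
  · rw [h]
    obtain ⟨d, hd, x, hx, hp⟩ := (pmfA_eq_true_iff _ _).mp h
    exact (hB.mpr ⟨x, hx, d, hd, hp⟩).symm
  · rw [h]
    symm
    rw [Bool.eq_false_iff, Ne, hB]
    rintro ⟨x, hx, d, hd, hp⟩
    exact (Bool.eq_false_iff.mp h) ((pmfA_eq_true_iff _ _).mpr ⟨d, hd, x, hx, hp⟩)
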